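-- pv_equiv track=rewrite | github.com/rmgil/Stats-APP-V1-ISOLADO | app/stats/postflop_site_parsers.py | detect_preflop_allin
-- ===== SOURCE A (Python) =====
-- def detect_preflop_allin(hand_text: str) -> bool:
--     """Check for all-ins before flop"""
--     lines = hand_text.split('\n')
--     found_hole_cards = False
--
--     for line in lines:
--         if '*** HOLE CARDS ***' in line or '*** Hole Cards ***' in line:
--             found_hole_cards = True
--         elif '*** FLOP ***' in line or '*** Flop ***' in line:
--             return False
--         elif found_hole_cards and 'all-in' in line.lower():
--             return True
--     return False
-- ===== SOURCE B (Python) =====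
-- def detect_preflop_allin(hand_text: str) -> bool:
--     """Check for all-ins before flop"""
--     lines = hand_text.split('\n')
--     hole = next((i for i, line in enumerate(lines)
--                  if '*** HOLE CARDS ***' in line or '*** Hole Cards ***' in line), None)
--     if hole is None:
--         return False
--     flop = next((i for i, line in enumerate(lines)
--                  if '*** FLOP ***' in line or '*** Flop ***' in line), len(lines))
--     return any('all-in' in line.lower() for line in lines[hole + 1:flop])
-- ===== Notes on version B (the rewrite author's own statement) =====
-- stated objective: alternative
-- what changed: Replaces A's single stateful scan (found_hole_cards flag with early returns) by a boundary-index decomposition: find the first hole-cards line and the first flop line, then search the lines strictly between them for 'all-in'; Pre_ excludes malformed texts where one line carries a HOLE-CARDS marker together with a FLOP marker or 'all-in', on which A's elif precedence (hole wins the line, its all-in is skipped) is as accidental as B's index choice.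
-- outside the precondition, e.g. on detect_preflop_allin('*** HOLE CARDS ***\n*** HOLE CARDS *** all-in'): A returns False, B returns True; on detect_preflop_allin('*** HOLE CARDS *** *** FLOP ***\nall-in'): A returns True, B returns False
import Mathlib
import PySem

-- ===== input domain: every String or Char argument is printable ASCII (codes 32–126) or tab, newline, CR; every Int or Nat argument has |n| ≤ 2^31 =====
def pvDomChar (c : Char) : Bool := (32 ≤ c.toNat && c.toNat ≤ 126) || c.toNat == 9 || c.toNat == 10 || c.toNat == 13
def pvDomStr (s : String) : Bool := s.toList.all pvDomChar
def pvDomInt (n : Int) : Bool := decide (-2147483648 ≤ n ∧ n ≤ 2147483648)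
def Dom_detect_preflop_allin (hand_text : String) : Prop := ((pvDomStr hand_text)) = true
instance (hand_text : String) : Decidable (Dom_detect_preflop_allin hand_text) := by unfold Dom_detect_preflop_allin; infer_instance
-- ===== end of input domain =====

-- B replaces A's stateful flag-scan by a boundary-index decomposition (objective:
-- alternative, same cost); Pre_ excludes texts with a hole-marker line that also
-- carries a flop marker or 'all-in', where the two precedence choices diverge.

-- ===== PORT A =====
-- shared line predicates (the same marker tests both Pythons perform)
def pvHole (l : String) : Bool :=
  PySem.Str.isIn "*** HOLE CARDS ***" l || PySem.Str.isIn "*** Hole Cards ***" l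

def pvFlop (l : String) : Bool :=
  PySem.Str.isIn "*** FLOP ***" l || PySem.Str.isIn "*** Flop ***" l

def pvAllin (l : String) : Bool :=
  PySem.Str.isIn "all-in" (PySem.Str.lower l)

-- A's loop: flag 'found_hole_cards', early return False on a flop line, True on an all-in line
def pvLoopA : List String → Bool → Bool
  | [], _ => false
  | l :: rest, found =>
    if pvHole l then pvLoopA rest true
    else if pvFlop l then false
    else if found && pvAllin l then true
    else pvLoopA rest found

def detect_preflop_allin (hand_text : String) : Bool :=
  match PySem.Str.split? hand_text "\n" with
  | some lines => pvLoopA lines false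
  | none => false   -- unreachable: the separator "\n" is non-empty

-- ===== PORT B =====
-- B's core on the list of lines: hole = first hole-line index (None → False),
-- flop = first flop-line index (default len), then any 'all-in' in lines[hole+1:flop]
def pvAltCore (lines : List String) : Bool :=
  match lines.findIdx? pvHole with
  | none => false
  | some hole =>
    let flop := (lines.findIdx? pvFlop).getD lines.length
    (PySem.List.slice lines (some ((hole : Int) + 1)) (some (flop : Int))).any pvAllin

def detect_preflop_allin_alt (hand_text : String) : Bool :=
  match PySem.Str.split? hand_text "\n" with
  | some lines => pvAltCore lines
  | none => false   -- unreachable: the separator "\n" is non-empty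

-- ===== PRECONDITION & SPEC =====
-- Pre_ excludes malformed texts in which a single line carries a HOLE-CARDS marker
-- together with a FLOP marker or 'all-in': there A's elif precedence (the hole marker
-- wins the line, its own 'all-in' is skipped) is an accident of the chain, and B's
-- boundary-index choice is an equally defensible reading.
def Pre_detect_preflop_allin (hand_text : String) : Prop :=
  ((PySem.Str.split? hand_text "\n").getD []).all
    (fun l => !(pvHole l && (pvFlop l || pvAllin l))) = true
instance (hand_text : String) : Decidable (Pre_detect_preflop_allin hand_text) := by
  unfold Pre_detect_preflop_allin; infer_instance

def pvWitness_detect_preflop_allin : String := "*** HOLE CARDS ***\nall-in"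

def Spec_detect_preflop_allin (hand_text : String) (out : Bool) : Prop := out = detect_preflop_allin_alt hand_text
instance (hand_text : String) (out : Bool) : Decidable (Spec_detect_preflop_allin hand_text out) := by unfold Spec_detect_preflop_allin; infer_instance

-- ===== CLAIM (what is proved, stated in full; the proofs are below) =====
def Claim_equal_detect_preflop_allin : Prop := ∀ (hand_text : String), Dom_detect_preflop_allin hand_text → Pre_detect_preflop_allin hand_text → Spec_detect_preflop_allin hand_text (detect_preflop_allin hand_text)

-- ===== LEMMAS AND PROOFS =====

-- take up to the first index satisfying p (or the whole list) = takeWhile (!p)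
theorem pv_take_findIdx {α : Type} (p : α → Bool) (ls : List α) :
    ls.take ((ls.findIdx? p).getD ls.length) = ls.takeWhile (fun x => !p x) := by
  induction ls with
  | nil => rfl
  | cons x xs ih =>
    rw [List.findIdx?_cons]
    by_cases hx : p x
    · simp [hx]
    · simp only [hx, if_neg, Bool.false_eq_true, not_false_iff, List.takeWhile_cons,
        Bool.not_false, if_true]
      cases h : xs.findIdx? p <;>
        simpa [h, List.take_succ_cons] using congrArg (List.cons x) (by simpa [h] using ih)

-- slice with bounds (a+1 : Int) and (b : Int), both casts of naturals, as drop/take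
theorem pv_slice_succ {α : Type} (xs : List α) (a b : Nat) :
    PySem.List.slice xs (some ((a : Int) + 1)) (some (b : Int)) =
      (xs.drop (a + 1)).take (b - (a + 1)) := by
  rw [show ((a : Int) + 1) = (((a + 1 : Nat)) : Int) by push_cast; ring,
    PySem.List.slice_natCast]

-- under Pre_, with the flag set, A's loop searches the lines before the first flop line
theorem pvLoopA_true (ls : List String)
    (hpre : ls.all (fun l => !(pvHole l && (pvFlop l || pvAllin l))) = true) :
    pvLoopA ls true = (ls.takeWhile (fun l => !pvFlop l)).any pvAllin := by
  induction ls with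
  | nil => rfl
  | cons l rest ih =>
    simp only [List.all_cons, Bool.and_eq_true] at hpre
    by_cases hh : pvHole l
    · have : ¬ pvFlop l ∧ ¬ pvAllin l := by
        rcases hpre with ⟨h1, _⟩
        simp [hh] at h1
        exact ⟨by simp [h1.1], by simp [h1.2]⟩
      simp [pvLoopA, hh, this.1, this.2, ih hpre.2]
    · by_cases hf : pvFlop l
      · simp [pvLoopA, hh, hf]
      · by_cases ha : pvAllin l
        · simp [pvLoopA, hh, hf, ha]
        · simp [pvLoopA, hh, hf, ha, ih hpre.2]

-- the main invariant: under Pre_, A's loop from the initial state equals B's core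
theorem pvLoopA_eq_altCore (ls : List String)
    (hpre : ls.all (fun l => !(pvHole l && (pvFlop l || pvAllin l))) = true) :
    pvLoopA ls false = pvAltCore ls := by
  induction ls with
  | nil => rfl
  | cons l rest ih =>
    have hpre' := hpre
    simp only [List.all_cons, Bool.and_eq_true] at hpre'
    by_cases hh : pvHole l
    · -- first hole line found here; by Pre_ it is neither flop nor all-in
      have hnf : ¬ pvFlop l := by
        rcases hpre' with ⟨h1, _⟩; simp [hh] at h1; simp [h1.1]
      simp only [pvLoopA, hh, if_true, pvAltCore, List.findIdx?_cons, hnf,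
        Bool.false_eq_true, if_neg, not_false_iff]
      rw [pvLoopA_true rest hpre'.2]
      have htk := pv_take_findIdx pvFlop rest
      cases hfi : rest.findIdx? pvFlop with
      | none =>
        simp only [hfi, Option.getD_none] at htk
        simp only [Option.map_none, Option.getD_none, List.length_cons]
        rw [pv_slice_succ (l :: rest) 0 (rest.length + 1)]
        simp [htk]
      | some k =>
        simp only [hfi, Option.getD_some] at htk
        simp only [Option.map_some, Option.getD_some]
        rw [pv_slice_succ (l :: rest) 0 (k + 1)]
        simp [htk]
    · by_cases hf : pvFlop l
      · -- flop line before any hole line: A returns False; in B, flop = 0 empties the slice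
        simp only [pvLoopA, hh, Bool.false_eq_true, if_neg, not_false_iff, hf, if_true,
          pvAltCore, List.findIdx?_cons]
        cases hhi : rest.findIdx? pvHole with
        | none => simp
        | some h =>
          simp only [Option.map_some, Option.getD_some]
          rw [pv_slice_succ (l :: rest) (h + 1) 0]
          simp
      · -- neutral line: both sides shift by one
        simp only [pvLoopA, hh, hf, Bool.false_eq_true, if_neg, not_false_iff,
          Bool.false_and, pvAltCore, List.findIdx?_cons]
        rw [ih hpre'.2, pvAltCore]
        cases hhi : rest.findIdx? pvHole with
        | none => simp
        | some h =>
          simp only [Option.map_some, List.length_cons]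
          cases hfi : rest.findIdx? pvFlop with
          | none =>
            simp only [Option.map_none, Option.getD_none]
            rw [pv_slice_succ rest h rest.length,
              pv_slice_succ (l :: rest) (h + 1) (rest.length + 1),
              show rest.length + 1 - (h + 1 + 1) = rest.length - (h + 1) by omega]
            simp only [List.drop_succ_cons]
          | some k =>
            simp only [Option.map_some, Option.getD_some]
            rw [pv_slice_succ rest h k, pv_slice_succ (l :: rest) (h + 1) (k + 1),
              show k + 1 - (h + 1 + 1) = k - (h + 1) by omega]
            simp only [List.drop_succ_cons]

-- ===== VERDICT (by name: the statement is the Claim_ definition above) =====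
theorem detect_preflop_allin_spec : Claim_equal_detect_preflop_allin := by
  intro hand_text _ hpre
  unfold Spec_detect_preflop_allin detect_preflop_allin detect_preflop_allin_alt
  unfold Pre_detect_preflop_allin at hpre
  cases h : PySem.Str.split? hand_text "\n" with
  | none => rfl
  | some lines =>
    rw [h] at hpre
    exact pvLoopA_eq_altCore lines (by simpa using hpre)
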